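-- pv_equiv track=rewrite | github.com/Aditya-Kumar-Code/data-analysis | new.py | pronoun
-- ===== SOURCE A (Python) =====
-- def pronoun(tokenize_text):
--     pronouns=['i','we','my','ours','us' ]
--     count=0
--     for i in tokenize_text:
--         if i.lower() in pronouns:
--             count+=1
--     personal_pronouns=count
--     return personal_pronouns
-- ===== SOURCE B (Python) =====
-- def pronoun(tokenize_text):
--     counts = {}
--     for t in tokenize_text:
--         w = t.lower()
--         counts[w] = counts.get(w, 0) + 1
--     return sum(counts.get(p, 0) for p in ('i', 'we', 'my', 'ours', 'us'))
-- ===== Notes on version B (the rewrite author's own statement) =====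
-- stated objective: alternative
-- what changed: B builds a frequency table of all lowercased tokens in one pass, then sums the table entries for the five pronouns, inverting A's per-token membership test into per-pronoun lookups.
import Mathlib
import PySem

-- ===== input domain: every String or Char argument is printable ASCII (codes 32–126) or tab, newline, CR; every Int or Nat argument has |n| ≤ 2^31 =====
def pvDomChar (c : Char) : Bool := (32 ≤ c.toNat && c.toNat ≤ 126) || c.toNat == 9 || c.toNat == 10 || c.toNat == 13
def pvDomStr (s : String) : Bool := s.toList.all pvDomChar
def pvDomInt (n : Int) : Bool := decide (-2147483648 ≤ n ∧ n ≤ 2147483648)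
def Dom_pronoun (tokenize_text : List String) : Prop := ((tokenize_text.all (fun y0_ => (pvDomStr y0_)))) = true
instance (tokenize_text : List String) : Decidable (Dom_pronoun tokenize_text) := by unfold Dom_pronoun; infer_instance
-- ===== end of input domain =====

-- B builds a frequency table of all lowercased tokens in one pass, then sums the
-- table entries for the five pronouns (alternative decomposition, same cost class).

-- ===== PORT A =====
def pronoun (tokenize_text : List String) : Int :=
  let pronouns : List String := ["i", "we", "my", "ours", "us"]
  let count : Int :=
    tokenize_text.foldl (fun count i => if PySem.Str.lower i ∈ pronouns then count + 1 else count) 0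
  let personal_pronouns := count
  personal_pronouns

-- ===== PORT B =====
def pronoun_alt (tokenize_text : List String) : Int :=
  let counts : PySem.Dict String Int :=
    tokenize_text.foldl (fun d t =>
      let w := PySem.Str.lower t
      d.insert w (d.getD w 0 + 1)) PySem.Dict.empty
  ((["i", "we", "my", "ours", "us"] : List String).map (fun p => counts.getD p 0)).sum

-- ===== PRECONDITION & SPEC =====
def Spec_pronoun (tokenize_text : List String) (out : Int) : Prop := out = pronoun_alt tokenize_text
instance (tokenize_text : List String) (out : Int) : Decidable (Spec_pronoun tokenize_text out) := by unfold Spec_pronoun; infer_instance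

-- ===== CLAIM (what is proved, stated in full; the proofs are below) =====
def Claim_equal_pronoun : Prop := ∀ (tokenize_text : List String), Dom_pronoun tokenize_text → Spec_pronoun tokenize_text (pronoun tokenize_text)

-- ===== LEMMAS AND PROOFS =====

-- Σ_{p ∈ pronouns} [p = x] collapses to a membership test (the pronoun list has no duplicates)
lemma sum_indicator_mem (x : String) :
    ((["i", "we", "my", "ours", "us"] : List String).map
      (fun p => if p == x then (1 : Int) else 0)).sum
      = if x ∈ (["i", "we", "my", "ours", "us"] : List String) then 1 else 0 := by
  by_cases h : x ∈ (["i", "we", "my", "ours", "us"] : List String)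
  · simp only [List.mem_cons, List.not_mem_nil, or_false] at h
    rcases h with h | h | h | h | h <;> subst h <;> decide
  · rw [if_neg h]
    simp only [List.mem_cons, List.not_mem_nil, or_false, not_or] at h
    obtain ⟨h1, h2, h3, h4, h5⟩ := h
    simp [List.map, beq_iff_eq, Ne.symm h1, Ne.symm h2, Ne.symm h3, Ne.symm h4, Ne.symm h5]

-- A's membership-test fold equals the sum of the per-pronoun counts of the word list
lemma fold_eq_sum_count (xs : List String) (c : Int) :
    xs.foldl (fun c w => if w ∈ (["i", "we", "my", "ours", "us"] : List String) then c + 1 else c) c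
      = c + ((["i", "we", "my", "ours", "us"] : List String).map
              (fun p => (xs.count p : Int))).sum := by
  induction xs generalizing c with
  | nil => simp
  | cons x xs ih =>
    simp only [List.foldl_cons, ih]
    have hcount : ((["i", "we", "my", "ours", "us"] : List String).map
        (fun p => ((x :: xs).count p : Int))).sum
        = ((["i", "we", "my", "ours", "us"] : List String).map
            (fun p => (xs.count p : Int))).sum
          + (if x ∈ (["i", "we", "my", "ours", "us"] : List String) then 1 else 0) := by
      have : ∀ p : String, ((x :: xs).count p : Int)
          = (xs.count p : Int) + (if p == x then (1 : Int) else 0) := by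
        intro p
        rw [List.count_cons]
        by_cases h : p = x
        · subst h; simp
        · simp [beq_iff_eq, h, Ne.symm h]
      simp only [this]
      rw [PySem.List.sum_map_add_int, sum_indicator_mem]
    rw [hcount]
    split <;> ring

-- ===== VERDICT (by name: the statement is the Claim_ definition above) =====
theorem pronoun_spec : Claim_equal_pronoun := by
  intro ts _
  unfold Spec_pronoun pronoun pronoun_alt
  have hdict : ts.foldl (fun d t =>
      let w := PySem.Str.lower t
      d.insert w (d.getD w 0 + 1)) (PySem.Dict.empty : PySem.Dict String Int)
      = PySem.Dict.counter (ts.map PySem.Str.lower) := by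
    rw [← PySem.Dict.foldl_insert_getD_add_one_eq_counter, List.foldl_map]
  simp only [hdict, PySem.Dict.getD_counter]
  have hmap : ts.foldl
      (fun count i => if PySem.Str.lower i ∈ (["i", "we", "my", "ours", "us"] : List String) then count + 1 else count) (0 : Int)
      = (ts.map PySem.Str.lower).foldl
          (fun c w => if w ∈ (["i", "we", "my", "ours", "us"] : List String) then c + 1 else c) 0 := by
    rw [List.foldl_map]
  rw [hmap, fold_eq_sum_count]
  ring
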